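-- pv_equiv track=rewrite | github.com/eagleliujun/leetcode | n1260.py | shiftGrid2
-- ===== SOURCE A (Python) =====
-- def shiftGrid2(grid,k):
--     lens_element = len(grid[0])
--     lens_grid = len(grid)
--     x = (k % (lens_grid*lens_element)) // lens_element
--     # 选出需要初始移动的主list长度
--     y = k % lens_element  # 选出初始需要移动的子list长度
--     grid_new = [[0] * lens_element for i in grid]
--     for i in range(lens_grid):
--         for j in range(lens_element):    # x：新主list;  y：新子list; i:旧主list； j:旧子list
--             if y >= lens_element:        # 超出子list长度
--                 y = y % lens_element     # 取出需要移动的子list：其实就是 y=0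
--                 x += 1                   # 主list移动一位
--             if x >= lens_grid:           # 超出主list长度
--                 x = x % lens_grid        # 主list 移动到下一位置 :其实就是x=0
--             grid_new[x][y]=grid[i][j]
--             y += 1                       # 子list移动一位
--     return grid_new
-- ===== SOURCE B (Python) =====
-- def shiftGrid2(grid, k):
--     m = len(grid)
--     n = len(grid[0])
--     mn = m * n
--     res = [[0] * n for _ in grid]
--     for i in range(m):
--         for j in range(n):
--             d = (i * n + j + k) % mn
--             res[d // n][d % n] = grid[i][j]
--     return res
-- ===== Notes on version B (the rewrite author's own statement) =====
-- stated objective: simpler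
-- what changed: B drops A's stateful carried (x,y) target cursor with its wrap-around if-branches and modular seeding, and instead computes each destination directly by flat modular arithmetic d = (i*n+j+k) % (m*n) from the loop indices.
import Mathlib
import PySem

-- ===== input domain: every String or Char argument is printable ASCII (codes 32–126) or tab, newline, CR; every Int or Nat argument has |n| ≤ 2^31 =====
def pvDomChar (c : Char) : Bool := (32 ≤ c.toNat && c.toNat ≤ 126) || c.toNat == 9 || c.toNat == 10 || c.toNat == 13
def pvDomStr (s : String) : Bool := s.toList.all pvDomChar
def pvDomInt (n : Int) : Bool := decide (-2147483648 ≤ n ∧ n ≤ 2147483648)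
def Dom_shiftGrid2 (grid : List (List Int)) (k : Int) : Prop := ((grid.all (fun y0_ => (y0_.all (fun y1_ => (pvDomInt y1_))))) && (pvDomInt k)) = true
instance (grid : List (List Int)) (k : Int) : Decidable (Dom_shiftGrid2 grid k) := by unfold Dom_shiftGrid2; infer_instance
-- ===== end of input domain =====

-- B replaces A's carried (x,y) write cursor and its wrap-around branches by direct
-- modular arithmetic on flat indices (d = (i*n+j+k) % (m*n)); same cost, plainer code.

-- grid_new[x][y] = v  (both Pythons contain this statement; rows are distinct fresh lists)
def pvSet2 (res : List (List Int)) (x y v : Int) : List (List Int) :=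
  PySem.List.pySetD res x (PySem.List.pySetD (PySem.List.pyGetD res x []) y v)

-- ===== PORT A =====
def shiftGrid2 (grid : List (List Int)) (k : Int) : List (List Int) :=
  let lensElement : Int := (PySem.List.pyGetD grid 0 []).length
  let lensGrid : Int := grid.length
  let x0 : Int := PySem.Int.floordiv (PySem.Int.mod k (lensGrid * lensElement)) lensElement
  let y0 : Int := PySem.Int.mod k lensElement
  let gridNew : List (List Int) := grid.map (fun _ => List.replicate lensElement.toNat 0)
  let st := (PySem.List.pyRange 0 lensGrid 1).foldl (fun st i =>
      (PySem.List.pyRange 0 lensElement 1).foldl (fun (st : Int × Int × List (List Int)) j =>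
        let p := if st.2.1 ≥ lensElement then (PySem.Int.mod st.2.1 lensElement, st.1 + 1)
                 else (st.2.1, st.1)
        let x := if p.2 ≥ lensGrid then PySem.Int.mod p.2 lensGrid else p.2
        let g := pvSet2 st.2.2 x p.1 (PySem.List.pyGetD (PySem.List.pyGetD grid i []) j 0)
        (x, p.1 + 1, g)) st) (x0, y0, gridNew)
  st.2.2

-- ===== PORT B =====
def shiftGrid2_alt (grid : List (List Int)) (k : Int) : List (List Int) :=
  let m : Int := grid.length
  let n : Int := (PySem.List.pyGetD grid 0 []).length
  let mn : Int := m * n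
  let init : List (List Int) := grid.map (fun _ => List.replicate n.toNat 0)
  (PySem.List.pyRange 0 m 1).foldl (fun res i =>
    (PySem.List.pyRange 0 n 1).foldl (fun (res : List (List Int)) j =>
      let d := PySem.Int.mod (i * n + j + k) mn
      pvSet2 res (PySem.Int.floordiv d n) (PySem.Int.mod d n)
        (PySem.List.pyGetD (PySem.List.pyGetD grid i []) j 0)) res) init

-- ===== PRECONDITION & SPEC =====
-- Pre_ excludes exactly the inputs on which the Python A raises: the empty grid and a
-- grid whose first row is empty (IndexError / ZeroDivisionError), and grids with a row
-- shorter than the first row (IndexError on grid[i][j]).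
def Pre_shiftGrid2 (grid : List (List Int)) (k : Int) : Prop :=
  grid ≠ [] ∧ 0 < (grid.headD []).length ∧
    ∀ row ∈ grid, (grid.headD []).length ≤ row.length

instance (grid : List (List Int)) (k : Int) : Decidable (Pre_shiftGrid2 grid k) := by
  unfold Pre_shiftGrid2; infer_instance

def pvWitness_shiftGrid2 : List (List Int) × Int := ([[1, 2], [3, 4]], 3)

def Spec_shiftGrid2 (grid : List (List Int)) (k : Int) (out : List (List Int)) : Prop := out = shiftGrid2_alt grid k
instance (grid : List (List Int)) (k : Int) (out : List (List Int)) : Decidable (Spec_shiftGrid2 grid k out) := by unfold Spec_shiftGrid2; infer_instance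

-- ===== CLAIM (what is proved, stated in full; the proofs are below) =====
def Claim_equal_shiftGrid2 : Prop := ∀ (grid : List (List Int)) (k : Int), Dom_shiftGrid2 grid k → Pre_shiftGrid2 grid k → Spec_shiftGrid2 grid k (shiftGrid2 grid k)

-- ===== LEMMAS AND PROOFS =====

-- the common flat-index write step both loops are reduced to
def pvG (grid : List (List Int)) (k m n : Int) (res : List (List Int)) (t : Int) : List (List Int) :=
  pvSet2 res (((t + k) % (m * n)) / n) (((t + k) % (m * n)) % n)
    (PySem.List.pyGetD (PySem.List.pyGetD grid (t / n) []) (t % n) 0)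

-- A's loop body, on flat state
def pvBodyA (grid : List (List Int)) (m n : Int) (st : Int × Int × List (List Int)) (t : Int) :
    Int × Int × List (List Int) :=
  let p := if st.2.1 ≥ n then (PySem.Int.mod st.2.1 n, st.1 + 1) else (st.2.1, st.1)
  let x := if p.2 ≥ m then PySem.Int.mod p.2 m else p.2
  (x, p.1 + 1, pvSet2 st.2.2 x p.1
    (PySem.List.pyGetD (PySem.List.pyGetD grid (t / n) []) (t % n) 0))

-- A's cursor invariant before processing flat index t
def pvInv (k m n x y t : Int) : Prop :=
  0 ≤ x ∧ x < m ∧ 0 ≤ y ∧ y ≤ n ∧ (x * n + y) % (m * n) = (t + k) % (m * n)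

lemma pv_shift_fold {σ : Type} (g : σ → Int → σ) (a b : Int) (s : σ) :
    (PySem.List.pyRange a b 1).foldl g s
      = (List.range (b - a).toNat).foldl (fun s (j : Nat) => g s (a + (j : Int))) s := by
  rw [PySem.List.pyRange_one, List.foldl_map]

lemma pv_flatten {σ : Type} (F : σ → Int → Int → σ) (G : σ → Int → σ) (n : Int) (hn : 0 < n)
    (hFG : ∀ s i j, 0 ≤ i → 0 ≤ j → j < n → F s i j = G s (i * n + j)) :
    ∀ (M : Nat) (s : σ),
      (PySem.List.pyRange 0 (M : Int) 1).foldl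
        (fun s i => (PySem.List.pyRange 0 n 1).foldl (fun s j => F s i j) s) s
      = (PySem.List.pyRange 0 ((M : Int) * n) 1).foldl G s := by
  intro M
  induction M with
  | zero =>
      intro s
      simp [PySem.List.pyRange_one_eq_nil (le_refl (0 : Int))]
  | succ M ih =>
      intro s
      have h1 : ((M + 1 : Nat) : Int) = (M : Int) + 1 := by push_cast; ring
      have h2 : ((M : Int) + 1) * n = (M : Int) * n + n := by ring
      rw [h1, PySem.List.pyRange_one_succ_right (by positivity), List.foldl_append, ih,
        h2, PySem.List.pyRange_one_append 0 ((M : Int) * n) ((M : Int) * n + n)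
          (by positivity) (by omega), List.foldl_append]
      simp only [List.foldl_cons, List.foldl_nil]
      rw [pv_shift_fold, pv_shift_fold, pv_shift_fold G ((M : Int) * n) ((M : Int) * n + n)]
      have h3 : ((M : Int) * n + n - (M : Int) * n).toNat = (n - 0).toNat := by omega
      rw [h3]
      apply PySem.List.foldl_congr_mem'
      intro j hj acc
      have hjn : (j : Int) < n := by
        have := List.mem_range.mp hj; omega
      rw [hFG acc (M : Int) (0 + (j : Int)) (by positivity) (by omega) (by omega)]
      congr 1
      omega

lemma pv_stepA (grid : List (List Int)) (k m n : Int) (hm : 0 < m) (hn : 0 < n)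
    (x y t : Int) (ht : 0 ≤ t) (hInv : pvInv k m n x y t) (res : List (List Int)) :
    pvBodyA grid m n (x, y, res) t
      = (((t + k) % (m * n)) / n, ((t + k) % (m * n)) % n + 1, pvG grid k m n res t)
    ∧ pvInv k m n (((t + k) % (m * n)) / n) (((t + k) % (m * n)) % n + 1) (t + 1) := by
  obtain ⟨hx0, hxm, hy0, hyn, hflat⟩ := hInv
  have hmn : 0 < m * n := by positivity
  set D : Int := (t + k) % (m * n) with hD
  have hD0 : 0 ≤ D := Int.emod_nonneg _ (by omega)
  have hDlt : D < m * n := Int.emod_lt_of_pos _ hmn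
  -- the adjusted cursor is exactly (D / n, D % n)
  have hkey : (if (if y ≥ n then (PySem.Int.mod y n, x + 1) else (y, x)).2 ≥ m
                then PySem.Int.mod (if y ≥ n then (PySem.Int.mod y n, x + 1) else (y, x)).2 m
                else (if y ≥ n then (PySem.Int.mod y n, x + 1) else (y, x)).2,
              (if y ≥ n then (PySem.Int.mod y n, x + 1) else (y, x)).1)
      = (D / n, D % n) := by
    by_cases hy : y ≥ n
    · have hyeq : y = n := le_antisymm hyn hy
      have hmodn : PySem.Int.mod y n = 0 := by
        rw [hyeq, PySem.Int.mod_eq_emod_of_pos hn, Int.emod_self]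
      rw [if_pos hy, hmodn]
      by_cases hx1 : x + 1 ≥ m
      · have hxeq : x + 1 = m := by omega
        have hflat' : x * n + y = m * n := by rw [hyeq]; nlinarith [hxeq]
        have hDeq : D = 0 := by
          rw [← hflat, hflat', Int.emod_self]
        rw [if_pos (show (0, x + 1).2 ≥ m from hx1), hDeq]
        show (PySem.Int.mod (x + 1) m, (0 : Int)) = _
        rw [hxeq, PySem.Int.mod_eq_emod_of_pos hm, Int.emod_self]
        simp
      · have hxm' : x + 1 < m := by omega
        have hflat' : x * n + y = (x + 1) * n := by rw [hyeq]; ring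
        have hlt : (x + 1) * n < m * n := mul_lt_mul_of_pos_right hxm' hn
        have hDeq : D = (x + 1) * n := by
          rw [← hflat, hflat', Int.emod_eq_of_lt (by positivity) hlt]
        rw [if_neg (show ¬ (0, x + 1).2 ≥ m from hx1), hDeq,
          Int.mul_ediv_cancel _ (by omega), Int.mul_emod_left]
    · have hylt : y < n := by omega
      have hlt : x * n + y < m * n := by nlinarith
      have hDeq : D = x * n + y := by
        rw [← hflat, Int.emod_eq_of_lt (by positivity) hlt]
      rw [if_neg hy, if_neg (show ¬ (y, x).2 ≥ m by simp; omega), hDeq]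
      refine Prod.ext ?_ ?_
      · show x = (x * n + y) / n
        rw [mul_comm x n, add_comm, Int.add_mul_ediv_left _ _ (by omega : n ≠ 0),
          Int.ediv_eq_zero_of_lt hy0 hylt, zero_add]
      · show y = (x * n + y) % n
        rw [mul_comm x n, add_comm, Int.add_mul_emod_self_left,
          Int.emod_eq_of_lt hy0 hylt]
  constructor
  · simp only [pvBodyA, pvG]
    rw [Prod.ext_iff] at hkey
    simp only at hkey
    rw [hkey.1, hkey.2]
  · refine ⟨Int.ediv_nonneg hD0 (by omega), ?_, ?_, ?_, ?_⟩
    · rw [Int.ediv_lt_iff_lt_mul hn]; exact hDlt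
    · have := Int.emod_nonneg D (by omega : n ≠ 0); omega
    · have := Int.emod_lt_of_pos D hn; omega
    · have hde : n * (D / n) + D % n = D := Int.mul_ediv_add_emod D n
      have h1 : D / n * n + (D % n + 1) = D + 1 := by rw [mul_comm]; omega
      rw [h1]
      have h2 : (t + 1 + k) = (t + k) + 1 := by ring
      rw [h2, Int.add_emod (t + k) 1, ← hD, Int.add_emod D 1,
        Int.emod_eq_of_lt hD0 hDlt]

lemma pv_loopA (grid : List (List Int)) (k m n : Int) (hm : 0 < m) (hn : 0 < n) :
    ∀ (T : Nat) (t₀ x y : Int) (res : List (List Int)), 0 ≤ t₀ → pvInv k m n x y t₀ →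
      ∃ x' y', (PySem.List.pyRange t₀ (t₀ + (T : Int)) 1).foldl (pvBodyA grid m n) (x, y, res)
          = (x', y', (PySem.List.pyRange t₀ (t₀ + (T : Int)) 1).foldl (pvG grid k m n) res)
        ∧ pvInv k m n x' y' (t₀ + (T : Int)) := by
  intro T
  induction T with
  | zero =>
      intro t₀ x y res ht hInv
      refine ⟨x, y, ?_, by simpa using hInv⟩
      rw [show ((0 : Nat) : Int) = 0 by rfl, add_zero,
        PySem.List.pyRange_one_eq_nil (le_refl t₀)]
      rfl
  | succ T ih =>
      intro t₀ x y res ht hInv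
      have hcons : PySem.List.pyRange t₀ (t₀ + ((T + 1 : Nat) : Int)) 1
          = t₀ :: PySem.List.pyRange (t₀ + 1) (t₀ + ((T + 1 : Nat) : Int)) 1 :=
        PySem.List.pyRange_one_cons (by push_cast; omega)
      have hend : t₀ + ((T + 1 : Nat) : Int) = (t₀ + 1) + (T : Int) := by push_cast; ring
      obtain ⟨hstep, hInv'⟩ := pv_stepA grid k m n hm hn x y t₀ ht hInv res
      obtain ⟨x', y', hfold, hInv''⟩ := ih (t₀ + 1) (((t₀ + k) % (m * n)) / n)
        (((t₀ + k) % (m * n)) % n + 1) (pvG grid k m n res t₀) (by omega) hInv'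
      refine ⟨x', y', ?_, by rwa [hend]⟩
      rw [hcons, List.foldl_cons, List.foldl_cons, hstep, hend, hfold]

lemma pv_idx (n i j : Int) (hn : 0 < n) (hi : 0 ≤ i) (hj0 : 0 ≤ j) (hj : j < n) :
    (i * n + j) / n = i ∧ (i * n + j) % n = j := by
  constructor
  · rw [mul_comm i n, add_comm, Int.add_mul_ediv_left _ _ (by omega : n ≠ 0),
      Int.ediv_eq_zero_of_lt hj0 hj, zero_add]
  · rw [mul_comm i n, add_comm, Int.add_mul_emod_self_left, Int.emod_eq_of_lt hj0 hj]

lemma pv_init (k m n : Int) (hm : 0 < m) (hn : 0 < n) :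
    pvInv k m n (PySem.Int.floordiv (PySem.Int.mod k (m * n)) n) (PySem.Int.mod k n) 0 := by
  have hmn : 0 < m * n := by positivity
  rw [pvInv, PySem.Int.mod_eq_emod_of_pos hmn, PySem.Int.mod_eq_emod_of_pos hn,
    PySem.Int.floordiv_eq_ediv_of_pos hn]
  have h0 : 0 ≤ k % (m * n) := Int.emod_nonneg _ (by omega)
  have hlt : k % (m * n) < m * n := Int.emod_lt_of_pos _ hmn
  refine ⟨Int.ediv_nonneg h0 (by omega), by rw [Int.ediv_lt_iff_lt_mul hn]; exact hlt,
    Int.emod_nonneg _ (by omega), le_of_lt (Int.emod_lt_of_pos _ hn), ?_⟩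
  have he : k % n = (k % (m * n)) % n := (Int.emod_emod_of_dvd k ⟨m, by ring⟩).symm
  have hsum : k % (m * n) / n * n + k % (m * n) % n = k % (m * n) := by
    rw [mul_comm]; exact Int.mul_ediv_add_emod _ _
  rw [he, hsum, Int.emod_emod_of_dvd k dvd_rfl, zero_add]

-- ===== VERDICT (by name: the statement is the Claim_ definition above) =====
theorem shiftGrid2_spec : Claim_equal_shiftGrid2 := by
  unfold Claim_equal_shiftGrid2
  intro grid k _hdom hpre
  obtain ⟨hne, hn0, _hrows⟩ := hpre
  have hg0 : PySem.List.pyGetD grid 0 [] = grid.headD [] := by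
    cases grid with
    | nil => exact absurd rfl hne
    | cons h t => simp [PySem.List.pyGetD, PySem.List.pyGet?, PySem.List.pyIdx?]
  set n : Int := ((grid.headD []).length : Int) with hn_def
  set m : Int := (grid.length : Int) with hm_def
  have hn : 0 < n := by omega
  have hm : 0 < m := by
    have : grid.length ≠ 0 := fun h => hne (List.length_eq_zero_iff.mp h)
    omega
  have hmn : 0 < m * n := by positivity
  unfold Spec_shiftGrid2 shiftGrid2 shiftGrid2_alt
  simp only [hg0, ← hn_def, ← hm_def]
  have hFGA : ∀ (s : Int × Int × List (List Int)) (i j : Int), 0 ≤ i → 0 ≤ j → j < n →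
      (fun (st : Int × Int × List (List Int)) (i j : Int) =>
        let p := if st.2.1 ≥ n then (PySem.Int.mod st.2.1 n, st.1 + 1) else (st.2.1, st.1)
        let x := if p.2 ≥ m then PySem.Int.mod p.2 m else p.2
        let g := pvSet2 st.2.2 x p.1 (PySem.List.pyGetD (PySem.List.pyGetD grid i []) j 0)
        (x, p.1 + 1, g)) s i j
      = pvBodyA grid m n s (i * n + j) := by
    intro s i j hi hj0 hj
    simp only [pvBodyA, (pv_idx n i j hn hi hj0 hj).1, (pv_idx n i j hn hi hj0 hj).2]
  have hFGB : ∀ (s : List (List Int)) (i j : Int), 0 ≤ i → 0 ≤ j → j < n →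
      (fun (res : List (List Int)) (i j : Int) =>
        let d := PySem.Int.mod (i * n + j + k) (m * n)
        pvSet2 res (PySem.Int.floordiv d n) (PySem.Int.mod d n)
          (PySem.List.pyGetD (PySem.List.pyGetD grid i []) j 0)) s i j
      = pvG grid k m n s (i * n + j) := by
    intro s i j hi hj0 hj
    simp only [pvG, PySem.Int.mod_eq_emod_of_pos hmn, PySem.Int.mod_eq_emod_of_pos hn,
      PySem.Int.floordiv_eq_ediv_of_pos hn,
      (pv_idx n i j hn hi hj0 hj).1, (pv_idx n i j hn hi hj0 hj).2]
  rw [pv_flatten _ (pvBodyA grid m n) n hn hFGA grid.length,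
    pv_flatten _ (pvG grid k m n) n hn hFGB grid.length]
  obtain ⟨x', y', hfold, _⟩ := pv_loopA grid k m n hm hn (m * n).toNat 0
    (PySem.Int.floordiv (PySem.Int.mod k (m * n)) n) (PySem.Int.mod k n)
    (grid.map (fun _ => List.replicate (n).toNat 0)) (le_refl 0) (pv_init k m n hm hn)
  have hcast : (0 : Int) + (((m * n).toNat : Nat) : Int) = m * n := by omega
  rw [hcast] at hfold
  rw [hfold]
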